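-- pv_equiv track=rewrite | github.com/dmakger/fotoprint-api-django | lib/combinations_lib.py | get_product_combination_id
-- ===== SOURCE A (Python) =====
-- def get_product_combination_id(base: dict[int, list[int]], current_ids: list[int]):
--     closest_key = None
--     max_matches = -1  # Счетчик для отслеживания наибольшего количества совпадений
--
--     # Итерируем по словарю в обратном порядке
--     # for key, values in reversed(base.items()):
--     for key, values in base.items():
--         matches = len(set(values) & set(current_ids))  # Подсчитываем количество совпадений между списками
--         if matches > max_matches:
--             max_matches = matches
--             closest_key = key
--     return closest_key
-- ===== SOURCE B (Python) =====
-- def get_product_combination_id(base: dict[int, list[int]], current_ids: list[int]):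
--     # Inverted index: id -> list of keys (in base order) whose value-set contains that id
--     id2keys = {}
--     for key, values in base.items():
--         for v in set(values):
--             id2keys.setdefault(v, []).append(key)
--     # Tally one vote per (distinct current id, key) pair
--     counts = {}
--     for cid in set(current_ids):
--         for key in id2keys.get(cid, []):
--             counts[key] = counts.get(key, 0) + 1
--     # First key with maximal tally; the -1 start returns the first key (or None) for zero overlap
--     closest_key = None
--     max_matches = -1
--     for key in base:
--         c = counts.get(key, 0)
--         if c > max_matches:
--             max_matches = c
--             closest_key = key
--     return closest_key
-- ===== Notes on version B (the rewrite author's own statement) =====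
-- stated objective: faster
-- what changed: Replaces A's per-key set-intersection scan (which rebuilds set(current_ids) for every key) by an inverted index (id -> keys whose values contain it) built once over base, a vote tally over the distinct current_ids, and a final in-order pass picking the first key with the maximal tally.
import Mathlib
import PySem

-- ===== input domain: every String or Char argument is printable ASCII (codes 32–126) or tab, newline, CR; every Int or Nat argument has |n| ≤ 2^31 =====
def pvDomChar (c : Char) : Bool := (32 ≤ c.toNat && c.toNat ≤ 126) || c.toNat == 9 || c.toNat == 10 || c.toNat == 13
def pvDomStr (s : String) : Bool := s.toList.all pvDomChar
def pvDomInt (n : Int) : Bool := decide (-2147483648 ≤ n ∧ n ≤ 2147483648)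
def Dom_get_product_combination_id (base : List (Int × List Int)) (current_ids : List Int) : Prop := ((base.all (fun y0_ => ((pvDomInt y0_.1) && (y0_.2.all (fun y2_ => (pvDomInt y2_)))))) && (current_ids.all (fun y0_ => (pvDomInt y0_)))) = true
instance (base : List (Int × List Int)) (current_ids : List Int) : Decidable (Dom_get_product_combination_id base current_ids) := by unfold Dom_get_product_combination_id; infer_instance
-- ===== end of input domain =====

-- B replaces A's per-key set-intersection scan by an inverted index (id -> keys) and a vote
-- tally, then picks the first key with the maximal tally; measured faster (A rebuilds
-- set(current_ids) per key); return-value equivalence.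

-- ===== PORT A =====
-- loop state (closest_key, max_matches); matches = len(set(values) & set(current_ids))
def get_product_combination_id (base : List (Int × List Int)) (current_ids : List Int) : Option Int :=
  (base.foldl
    (fun (st : Option Int × Int) kv =>
      let matches_ : Int :=
        ((PySem.Set.inter (PySem.Set.ofList kv.2) (PySem.Set.ofList current_ids)).length : Int)
      if matches_ > st.2 then (some kv.1, matches_) else st)
    (none, -1)).1

-- ===== PORT B =====
-- id2keys.setdefault(v, []).append(key) is Dict.modify v [] (· ++ [key]);
-- counts[key] = counts.get(key, 0) + 1 is Dict.modify key 0 (· + 1);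
-- 'for key in base' iterates the dict's keys, i.e. the pairs' first components in order.
def get_product_combination_id_alt (base : List (Int × List Int)) (current_ids : List Int) : Option Int :=
  let id2keys : PySem.Dict Int (List Int) :=
    base.foldl
      (fun d kv =>
        (PySem.Set.ofList kv.2).foldl
          (fun d v => PySem.Dict.modify d v [] (fun l => l ++ [kv.1])) d)
      PySem.Dict.empty
  let counts : PySem.Dict Int Int :=
    (PySem.Set.ofList current_ids).foldl
      (fun d cid =>
        (PySem.Dict.getD id2keys cid []).foldl
          (fun d k => PySem.Dict.modify d k 0 (· + 1)) d)
      PySem.Dict.empty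
  (base.foldl
    (fun (st : Option Int × Int) kv =>
      let c := PySem.Dict.getD counts kv.1 0
      if c > st.2 then (some kv.1, c) else st)
    (none, -1)).1

-- ===== PRECONDITION & SPEC =====
-- Pre_ excludes association lists with duplicate keys: they do not represent any Python dict
-- (dict keys are unique), so no Python input corresponds to them.
def Pre_get_product_combination_id (base : List (Int × List Int)) (current_ids : List Int) : Prop :=
  (base.map Prod.fst).Nodup
instance (base : List (Int × List Int)) (current_ids : List Int) : Decidable (Pre_get_product_combination_id base current_ids) := by unfold Pre_get_product_combination_id; infer_instance

def pvWitness_get_product_combination_id : (List (Int × List Int)) × List Int :=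
  ([(1, [3, 4]), (2, [4, 5, 6])], [5, 6, 7])

def Spec_get_product_combination_id (base : List (Int × List Int)) (current_ids : List Int) (out : Option Int) : Prop := out = get_product_combination_id_alt base current_ids
instance (base : List (Int × List Int)) (current_ids : List Int) (out : Option Int) : Decidable (Spec_get_product_combination_id base current_ids out) := by unfold Spec_get_product_combination_id; infer_instance

-- ===== CLAIM (what is proved, stated in full; the proofs are below) =====
def Claim_equal_get_product_combination_id : Prop := ∀ (base : List (Int × List Int)) (current_ids : List Int), Dom_get_product_combination_id base current_ids → Pre_get_product_combination_id base current_ids → Spec_get_product_combination_id base current_ids (get_product_combination_id base current_ids)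

-- ===== LEMMAS AND PROOFS =====

-- filtering a duplicate-free list by (== c) leaves [c] or nothing
theorem pv_filter_beq_of_nodup (s : List Int) (hs : s.Nodup) (c : Int) :
    s.filter (fun v => v == c) = if c ∈ s then [c] else [] := by
  induction s with
  | nil => simp
  | cons a t ih =>
    simp only [List.nodup_cons] at hs
    by_cases hac : a = c
    · subst hac
      have : t.filter (fun v => v == a) = [] := by
        rw [ih hs.2]; simp [hs.1]
      simp [this]
    · simp only [List.filter_cons, beq_iff_eq, hac, if_false, ih hs.2]
      simp [List.mem_cons, Ne.symm hac]

-- one key's inner loop appends that key to id2keys[c] exactly when c is among its values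
theorem pv_inner_id2keys (vs : List Int) (k c : Int) (d : PySem.Dict Int (List Int)) :
    ((PySem.Set.ofList vs).foldl
        (fun d v => PySem.Dict.modify d v [] (fun l => l ++ [k])) d).getD c []
      = d.getD c [] ++ (if c ∈ vs then [k] else []) := by
  have h1 : (PySem.Set.ofList vs).foldl
        (fun d v => PySem.Dict.modify d v [] (fun l => l ++ [k])) d
      = ((PySem.Set.ofList vs).map (fun v => (v, k))).foldl
        (fun d p => PySem.Dict.modify d p.1 [] (fun l => l ++ [p.2])) d := by
    rw [List.foldl_map]
  rw [h1, PySem.Dict.getD_foldl_modify_append]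
  congr 1
  rw [List.filter_map]
  simp only [List.map_map, Function.comp_def]
  rw [pv_filter_beq_of_nodup _ (PySem.Set.nodup_ofList vs) c]
  by_cases h : c ∈ vs <;> simp [h, PySem.Set.mem_ofList]

-- id2keys[c] lists, in base order, the keys whose values contain c
theorem pv_id2keys_getD (bs : List (Int × List Int)) (d : PySem.Dict Int (List Int)) (c : Int) :
    (bs.foldl
        (fun d kv =>
          (PySem.Set.ofList kv.2).foldl
            (fun d v => PySem.Dict.modify d v [] (fun l => l ++ [kv.1])) d) d).getD c []
      = d.getD c [] ++ (bs.filter (fun kv => decide (c ∈ kv.2))).map (·.1) := by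
  induction bs generalizing d with
  | nil => simp
  | cons p t ih =>
    simp only [List.foldl_cons]
    rw [ih, pv_inner_id2keys]
    by_cases h : c ∈ p.2 <;> simp [h]

-- the tally loop sums, over the distinct current ids, the occurrences of k in g cid
theorem pv_counts_getD (cs : List Int) (g : Int → List Int) (d : PySem.Dict Int Int) (k : Int) :
    (cs.foldl
        (fun d cid => (g cid).foldl (fun d k' => PySem.Dict.modify d k' 0 (· + 1)) d) d).getD k 0
      = d.getD k 0 + (cs.map (fun cid => ((g cid).count k : Int))).sum := by
  induction cs generalizing d with
  | nil => simp
  | cons a t ih =>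
    simp only [List.foldl_cons, List.map_cons, List.sum_cons]
    rw [ih, PySem.Dict.getD_foldl_modify_add_one]
    ring

-- with duplicate-free keys, k occurs in the filtered key list iff its own values pass the test
theorem pv_count_key_filter (bs : List (Int × List Int)) (k : Int) (vk : List Int)
    (q : List Int → Bool)
    (hnd : (bs.map Prod.fst).Nodup) (hmem : (k, vk) ∈ bs) :
    ((bs.filter (fun kv => q kv.2)).map (·.1)).count k = if q vk then 1 else 0 := by
  induction bs with
  | nil => cases hmem
  | cons p t ih =>
    simp only [List.map_cons, List.nodup_cons] at hnd
    rcases List.mem_cons.mp hmem with h | h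
    · subst h
      have htz : ((t.filter (fun kv => q kv.2)).map (·.1)).count k = 0 := by
        rw [List.count_eq_zero]
        intro hk
        rcases List.mem_map.mp hk with ⟨kv, hkv, hfst⟩
        exact hnd.1 (hfst ▸ List.mem_map.mpr ⟨kv, (List.mem_filter.mp hkv).1, rfl⟩)
      by_cases hq : q vk <;> simp [hq, htz]
    · have hne : p.1 ≠ k := by
        intro he
        exact hnd.1 (he ▸ List.mem_map.mpr ⟨(k, vk), h, rfl⟩)
      rw [← ih hnd.2 h]
      by_cases hq : q p.2 <;> simp [hq, hne]

-- |set(vk) & set(cur)| counted from cur's side: distinct current ids that are values of k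
theorem pv_inter_len (vk cur : List Int) :
    ((PySem.Set.inter (PySem.Set.ofList vk) (PySem.Set.ofList cur)).length : Int)
      = (((PySem.Set.ofList cur).countP (fun c => decide (c ∈ vk))) : Int) := by
  rw [List.countP_eq_length_filter]
  congr 1
  apply List.Perm.length_eq
  unfold PySem.Set.inter
  rw [List.perm_ext_iff_of_nodup
        ((PySem.Set.nodup_ofList vk).filter _) ((PySem.Set.nodup_ofList cur).filter _)]
  intro a
  simp [PySem.Set.contains, List.mem_filter, PySem.Set.mem_ofList, and_comm]

-- per key of base, B's tally equals A's intersection size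
theorem pv_counts_eq_matches (bs : List (Int × List Int)) (cur : List Int)
    (k : Int) (vk : List Int)
    (hnd : (bs.map Prod.fst).Nodup) (hmem : (k, vk) ∈ bs) :
    (PySem.Dict.getD
        ((PySem.Set.ofList cur).foldl
          (fun d cid =>
            (PySem.Dict.getD
                (bs.foldl
                  (fun d kv =>
                    (PySem.Set.ofList kv.2).foldl
                      (fun d v => PySem.Dict.modify d v [] (fun l => l ++ [kv.1])) d)
                  PySem.Dict.empty) cid []).foldl
              (fun d k' => PySem.Dict.modify d k' 0 (· + 1)) d)
          PySem.Dict.empty) k 0)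
      = ((PySem.Set.inter (PySem.Set.ofList vk) (PySem.Set.ofList cur)).length : Int) := by
  rw [pv_counts_getD, PySem.Dict.getD_empty, pv_inter_len]
  have hmap : (PySem.Set.ofList cur).map
      (fun cid => ((PySem.Dict.getD
          (bs.foldl
            (fun d kv =>
              (PySem.Set.ofList kv.2).foldl
                (fun d v => PySem.Dict.modify d v [] (fun l => l ++ [kv.1])) d)
            PySem.Dict.empty) cid []).count k : Int))
      = (PySem.Set.ofList cur).map
      (fun cid => if (fun c => decide (c ∈ vk)) cid then (1:Int) else 0) := by
    apply List.map_congr_left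
    intro cid _
    rw [pv_id2keys_getD, PySem.Dict.getD_empty, List.nil_append,
        pv_count_key_filter bs k vk (fun vs => decide (cid ∈ vs)) hnd hmem]
    by_cases h : cid ∈ vk <;> simp [h]
  rw [hmap, PySem.List.sum_map_ite_one_zero]
  simp

-- ===== VERDICT (by name: the statement is the Claim_ definition above) =====
theorem get_product_combination_id_spec : Claim_equal_get_product_combination_id := by
  intro base current_ids _ hpre
  unfold Spec_get_product_combination_id
  unfold get_product_combination_id get_product_combination_id_alt
  simp only []
  congr 1
  apply PySem.List.foldl_congr_mem
  intro st kv hkv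
  rw [pv_counts_eq_matches base current_ids kv.1 kv.2 hpre (by simpa using hkv)]
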